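-- pv_equiv track=rewrite | github.com/guige2023/rabai_autoclick | actions/filter_action.py | filter_indices
-- ===== SOURCE A (Python) =====
-- from typing import Any, Callable, Dict, Generic, Iterable, Iterator, List, Optional, Pattern, Sequence, Set, TypeVar, Union
--
-- T = TypeVar("T")
--
-- def filter_indices(
--     items: Sequence[T],
--     indices: Iterable[int],
-- ) -> Iterator[T]:
--     """Filter by specific indices.
--
--     Args:
--         items: Input sequence.
--         indices: Indices to keep.
--
--     Yields:
--         Items at specified indices.
--     """
--     index_set = set(indices)
--     for i, item in enumerate(items):
--         if i in index_set:
--             yield item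
-- ===== SOURCE B (Python) =====
-- def filter_indices(items, indices):
--     """Yield items at the given indices, in increasing index order."""
--     n = len(items)
--     for i in sorted({j for j in indices if 0 <= j < n}):
--         yield items[i]
-- ===== Notes on version B (the rewrite author's own statement) =====
-- stated objective: faster
-- what changed: Instead of scanning every position of items and testing membership in the index set, B deduplicates and sorts only the in-range indices and indexes items directly, skipping the O(n) scan.
import Mathlib
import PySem

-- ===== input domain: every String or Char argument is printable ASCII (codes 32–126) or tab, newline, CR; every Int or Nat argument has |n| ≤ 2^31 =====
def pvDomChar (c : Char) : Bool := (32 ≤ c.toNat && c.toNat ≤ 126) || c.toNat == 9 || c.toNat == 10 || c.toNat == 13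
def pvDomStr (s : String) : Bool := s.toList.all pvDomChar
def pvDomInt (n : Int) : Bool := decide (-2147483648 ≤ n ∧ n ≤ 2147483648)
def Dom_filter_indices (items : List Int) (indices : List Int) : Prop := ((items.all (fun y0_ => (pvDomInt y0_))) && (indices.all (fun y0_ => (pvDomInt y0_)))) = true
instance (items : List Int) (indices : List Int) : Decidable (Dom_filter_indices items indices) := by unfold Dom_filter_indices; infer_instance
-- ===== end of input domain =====

-- B replaces the full scan of items with sorting the deduplicated in-range indices and direct indexing (faster for few indices).
-- ===== PORT A =====
def filter_indices (items : List Int) (indices : List Int) : List Int :=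
  let index_set : PySem.Set Int := PySem.Set.ofList indices
  (PySem.List.enumerate items 0).foldl
    (fun acc p => if PySem.Set.contains index_set p.1 then acc ++ [p.2] else acc) []

-- ===== PORT B =====
def filter_indices_alt (items : List Int) (indices : List Int) : List Int :=
  let n : Int := items.length
  let valid : PySem.Set Int :=
    PySem.Set.ofList (indices.filter (fun j => decide (0 ≤ j) && decide (j < n)))
  (PySem.List.sorted valid (fun x => x) false).map
    (fun i => PySem.List.pyGetD items i 0)

-- ===== PRECONDITION & SPEC =====
def Spec_filter_indices (items : List Int) (indices : List Int) (out : List Int) : Prop := out = filter_indices_alt items indices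
instance (items : List Int) (indices : List Int) (out : List Int) : Decidable (Spec_filter_indices items indices out) := by unfold Spec_filter_indices; infer_instance

-- ===== CLAIM (what is proved, stated in full; the proofs are below) =====
def Claim_equal_filter_indices : Prop := ∀ (items : List Int) (indices : List Int), Dom_filter_indices items indices → Spec_filter_indices items indices (filter_indices items indices)

-- ===== LEMMAS AND PROOFS =====

-- ===== VERDICT (by name: the statement is the Claim_ definition above) =====
-- The canonical value both sides equal: in-range positions of items whose index is in indices, in order.
def canon (items indices : List Int) : List Int :=
  ((PySem.List.pyRange 0 items.length 1).filter (fun j => decide (j ∈ indices))).map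
    (fun j => PySem.List.pyGetD items j 0)

theorem a_eq_canon (items indices : List Int) :
    filter_indices items indices = canon items indices := by
  unfold filter_indices canon
  rw [PySem.List.enumerate_eq_map_pyRange (d := 0),
      PySem.List.foldl_append_if]
  simp [List.filter_map, Function.comp_def, PySem.Set.contains, PySem.Set.mem_ofList]

theorem sorted_valid (items indices : List Int) :
    PySem.List.sorted
      (PySem.Set.ofList (indices.filter (fun j => decide (0 ≤ j) && decide (j < (items.length : Int)))))
      (fun x => x) false
    = (PySem.List.pyRange 0 items.length 1).filter (fun j => decide (j ∈ indices)) := by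
  apply PySem.List.sorted_eq_of_perm_of_pairwise_lt
  · apply (List.perm_ext_iff_of_nodup ?_ ?_).2
    · intro j
      simp [PySem.List.mem_pyRange_one, PySem.Set.mem_ofList, List.mem_filter]
      tauto
    · exact (PySem.List.nodup_pyRange_one 0 _).filter _
    · exact PySem.Set.nodup_ofList _
  · exact (PySem.List.pairwise_lt_pyRange_one 0 _).filter _

theorem b_eq_canon (items indices : List Int) :
    filter_indices_alt items indices = canon items indices := by
  show List.map _ (PySem.List.sorted _ _ _) = _
  rw [sorted_valid]
  rfl

-- ===== VERDICT (by name: the statement is the Claim_ definition above) =====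
theorem filter_indices_spec : Claim_equal_filter_indices := by
  intro items indices _
  unfold Spec_filter_indices
  rw [a_eq_canon, b_eq_canon]
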